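-- pv_equiv track=rewrite | github.com/AbnadabyBonaparte/suna-alsham-automl | backend/app/agents/sales/sales_orchestrator_agent.py | _prioritize_optimizations
-- ===== SOURCE A (Python) =====
-- from typing import Dict, List, Optional, Any, Tuple
--
-- def _prioritize_optimizations(suggestions: List[Dict[str, Any]]) -> List[str]:
--     """Prioriza otimizações por impacto"""
--     priority_order = []
--
--     # Prioridade 1: Issues que afetam success rate
--     for suggestion in suggestions:
--         if suggestion["issue"] == "low_success_rate":
--             priority_order.append(f"HIGH: {suggestion['recommendation']}")
--
--     # Prioridade 2: Issues de performance
--     for suggestion in suggestions: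
--         if suggestion["issue"] == "slow_execution":
--             priority_order.append(f"MEDIUM: {suggestion['recommendation']}")
--
--     # Prioridade 3: Otimizações gerais
--     for suggestion in suggestions:
--         if suggestion["issue"] == "high_volume":
--             priority_order.append(f"LOW: {suggestion['recommendation']}")
--
--     return priority_order
-- ===== SOURCE B (Python) =====
-- def _prioritize_optimizations(suggestions):
--     """Single pass with three buckets instead of three scans; same output order."""
--     high, medium, low = [], [], []
--     for suggestion in suggestions:
--         issue = suggestion["issue"]
--         if issue == "low_success_rate":
--             high.append(f"HIGH: {suggestion['recommendation']}")
--         elif issue == "slow_execution":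
--             medium.append(f"MEDIUM: {suggestion['recommendation']}")
--         elif issue == "high_volume":
--             low.append(f"LOW: {suggestion['recommendation']}")
--     return high + medium + low
-- ===== Notes on version B (the rewrite author's own statement) =====
-- stated objective: alternative
-- what changed: Replaces A's three full scans of the suggestion list with one pass that maintains three bucket lists (high/medium/low) and concatenates them at the end.
import Mathlib
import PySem

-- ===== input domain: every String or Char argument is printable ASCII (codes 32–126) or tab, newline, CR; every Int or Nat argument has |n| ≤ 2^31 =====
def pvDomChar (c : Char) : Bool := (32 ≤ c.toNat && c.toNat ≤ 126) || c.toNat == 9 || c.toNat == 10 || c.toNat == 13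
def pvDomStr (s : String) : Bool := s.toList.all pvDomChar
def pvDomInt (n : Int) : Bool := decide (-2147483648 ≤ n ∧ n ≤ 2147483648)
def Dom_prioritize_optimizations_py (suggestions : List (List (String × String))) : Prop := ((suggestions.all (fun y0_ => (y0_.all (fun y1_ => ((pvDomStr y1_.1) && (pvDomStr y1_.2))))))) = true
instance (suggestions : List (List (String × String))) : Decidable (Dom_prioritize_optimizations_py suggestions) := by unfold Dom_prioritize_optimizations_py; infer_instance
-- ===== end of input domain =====

-- B replaces A's three full scans of the list by one pass keeping three bucket lists; return-value equivalence only.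

-- dict lookup (first match); Pre_ guarantees the key is present, so getD's default is never used inside Pre_
def pvGetKey (s : List (String × String)) (k : String) : String :=
  (List.lookup k s).getD ""

-- ===== PORT A =====
def prioritize_optimizations_py (suggestions : List (List (String × String))) : List String :=
  let p1 := suggestions.foldl (fun acc s =>
    if pvGetKey s "issue" == "low_success_rate" then acc ++ ["HIGH: " ++ pvGetKey s "recommendation"] else acc) []
  let p2 := suggestions.foldl (fun acc s =>
    if pvGetKey s "issue" == "slow_execution" then acc ++ ["MEDIUM: " ++ pvGetKey s "recommendation"] else acc) p1
  suggestions.foldl (fun acc s =>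
    if pvGetKey s "issue" == "high_volume" then acc ++ ["LOW: " ++ pvGetKey s "recommendation"] else acc) p2

-- ===== PORT B =====
def pvStepB (b : List String × List String × List String) (s : List (String × String)) :
    List String × List String × List String :=
  let issue := pvGetKey s "issue"
  if issue == "low_success_rate" then (b.1 ++ ["HIGH: " ++ pvGetKey s "recommendation"], b.2.1, b.2.2)
  else if issue == "slow_execution" then (b.1, b.2.1 ++ ["MEDIUM: " ++ pvGetKey s "recommendation"], b.2.2)
  else if issue == "high_volume" then (b.1, b.2.1, b.2.2 ++ ["LOW: " ++ pvGetKey s "recommendation"])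
  else b

def prioritize_optimizations_py_alt (suggestions : List (List (String × String))) : List String :=
  let b := suggestions.foldl pvStepB ([], [], [])
  b.1 ++ b.2.1 ++ b.2.2

-- ===== PRECONDITION & SPEC =====
-- Pre_ excludes exactly the inputs on which Python A raises KeyError: a suggestion without an
-- "issue" key, or a matching suggestion (one of the three issue values) without "recommendation".
def Pre_prioritize_optimizations_py (suggestions : List (List (String × String))) : Prop :=
  ∀ s ∈ suggestions, (List.lookup "issue" s).isSome = true ∧
    ((List.lookup "issue" s).getD "" ∈ ["low_success_rate", "slow_execution", "high_volume"] →
      (List.lookup "recommendation" s).isSome = true)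
instance (suggestions : List (List (String × String))) : Decidable (Pre_prioritize_optimizations_py suggestions) := by
  unfold Pre_prioritize_optimizations_py; infer_instance
def pvWitness_prioritize_optimizations_py : (List (List (String × String))) :=
  [[("issue", "slow_execution"), ("recommendation", "retry")], [("issue", "ok")]]

def Spec_prioritize_optimizations_py (suggestions : List (List (String × String))) (out : List String) : Prop := out = prioritize_optimizations_py_alt suggestions
instance (suggestions : List (List (String × String))) (out : List String) : Decidable (Spec_prioritize_optimizations_py suggestions out) := by unfold Spec_prioritize_optimizations_py; infer_instance

-- ===== CLAIM (what is proved, stated in full; the proofs are below) =====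
def Claim_equal_prioritize_optimizations_py : Prop := ∀ (suggestions : List (List (String × String))), Dom_prioritize_optimizations_py suggestions → Pre_prioritize_optimizations_py suggestions → Spec_prioritize_optimizations_py suggestions (prioritize_optimizations_py suggestions)

-- ===== LEMMAS AND PROOFS =====

-- B's single loop decomposes componentwise into the three filtered passes
theorem pvStepB_decomp (xs : List (List (String × String)))
    (h m l : List String) :
    xs.foldl pvStepB (h, m, l) =
      (h ++ (xs.filter (fun s => pvGetKey s "issue" == "low_success_rate")).map
              (fun s => "HIGH: " ++ pvGetKey s "recommendation"),
       m ++ (xs.filter (fun s => pvGetKey s "issue" == "slow_execution")).map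
              (fun s => "MEDIUM: " ++ pvGetKey s "recommendation"),
       l ++ (xs.filter (fun s => pvGetKey s "issue" == "high_volume")).map
              (fun s => "LOW: " ++ pvGetKey s "recommendation")) := by
  induction xs generalizing h m l with
  | nil => simp
  | cons x xs ih =>
    simp only [List.foldl_cons, List.filter_cons, pvStepB]
    by_cases h1 : pvGetKey x "issue" = "low_success_rate"
    · simp [h1, ih]
    · by_cases h2 : pvGetKey x "issue" = "slow_execution"
      · simp [h1, h2, ih]
      · by_cases h3 : pvGetKey x "issue" = "high_volume"
        · simp [h1, h2, h3, ih]
        · simp [h1, h2, h3, ih]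

-- ===== VERDICT (by name: the statement is the Claim_ definition above) =====
theorem prioritize_optimizations_py_spec : Claim_equal_prioritize_optimizations_py := by
  intro suggestions _ _
  unfold Spec_prioritize_optimizations_py
  unfold prioritize_optimizations_py prioritize_optimizations_py_alt
  rw [PySem.List.foldl_append_if, PySem.List.foldl_append_if, PySem.List.foldl_append_if,
    pvStepB_decomp]
  simp
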